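-- pv_equiv track=rewrite | github.com/Efrem99/game | launchers/studio_workspace_state.py | toggle_favorite_path
-- ===== SOURCE A (Python) =====
-- def normalize_workspace_paths(paths, *, limit: int | None = None) -> list[str]:
--     normalized = []
--     seen = set()
--     for raw_path in list(paths or []):
--         relative_path = str(raw_path or "").strip()
--         if not relative_path or relative_path in seen:
--             continue
--         seen.add(relative_path)
--         normalized.append(relative_path)
--         if limit is not None and len(normalized) >= limit:
--             break
--     return normalized
--
-- def toggle_favorite_path(paths, relative_path: str) -> list[str]:
--     candidate = str(relative_path or "").strip()
--     favorites = normalize_workspace_paths(paths)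
--     if not candidate:
--         return favorites
--     if candidate in favorites:
--         return [item for item in favorites if item != candidate]
--     favorites.append(candidate)
--     return favorites
-- ===== SOURCE B (Python) =====
-- def toggle_favorite_path(paths, relative_path: str) -> list[str]:
--     candidate = str(relative_path or "").strip()
--     seen = set()
--     result = []
--     found = False
--     for raw in list(paths or []):
--         p = str(raw or "").strip()
--         if not p or p in seen:
--             continue
--         if p == candidate:
--             found = True
--             continue
--         seen.add(p)
--         result.append(p)
--     if candidate and not found:
--         result.append(candidate)
--     return result
-- ===== Notes on version B (the rewrite author's own statement) =====
-- stated objective: simpler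
-- what changed: Replaces the normalize-then-membership-scan-then-rebuild pipeline (three passes over the list) with a single pass carrying a seen set and a found flag, appending the candidate at the end only if it was never met.
import Mathlib
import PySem

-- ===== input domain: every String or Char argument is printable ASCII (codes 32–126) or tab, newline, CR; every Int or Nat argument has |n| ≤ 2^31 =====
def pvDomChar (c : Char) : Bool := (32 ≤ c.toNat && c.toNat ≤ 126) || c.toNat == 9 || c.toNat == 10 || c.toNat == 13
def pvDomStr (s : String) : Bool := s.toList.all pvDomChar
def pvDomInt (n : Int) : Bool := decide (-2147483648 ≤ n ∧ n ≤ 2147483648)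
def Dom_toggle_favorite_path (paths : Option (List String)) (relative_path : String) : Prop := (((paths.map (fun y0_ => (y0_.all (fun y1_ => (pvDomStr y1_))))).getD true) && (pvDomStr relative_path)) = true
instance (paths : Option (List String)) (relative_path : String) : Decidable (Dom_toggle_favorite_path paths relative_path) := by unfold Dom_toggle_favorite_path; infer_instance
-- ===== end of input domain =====

-- B replaces A's normalize + membership scan + rebuild (three passes) by one pass with a found flag; objective: simpler.

-- ===== PORT A =====
-- loop of normalize_workspace_paths: for raw_path in list(paths or []): …
-- str(raw_path or "") = raw_path for string inputs (str('' ) = ''), so the normalization is exactly Str.strip.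
def nwp_loop (limit : Option Int) : List String → List String → PySem.Set String → List String
  | [], normalized, _ => normalized
  | raw :: rest, normalized, seen =>
    let p := PySem.Str.strip raw
    if p == "" || PySem.Set.contains seen p then
      nwp_loop limit rest normalized seen
    else
      let seen' := PySem.Set.add seen p
      let normalized' := normalized ++ [p]
      match limit with
      | some l => if (normalized'.length : Int) ≥ l then normalized' else nwp_loop limit rest normalized' seen'
      | none => nwp_loop limit rest normalized' seen'

def normalize_workspace_paths (paths : Option (List String)) (limit : Option Int) : List String :=
  nwp_loop limit (paths.getD []) [] PySem.Set.empty

def toggle_favorite_path (paths : Option (List String)) (relative_path : String) : List String :=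
  let candidate := PySem.Str.strip relative_path
  let favorites := normalize_workspace_paths paths none
  if candidate == "" then favorites
  else if favorites.contains candidate then favorites.filter (fun item => item != candidate)
  else favorites ++ [candidate]

-- ===== PORT B =====
-- one pass: skip empty/seen, mark the candidate as found, otherwise keep
def tfp_loop (candidate : String) : List String → PySem.Set String → List String → Bool → List String × Bool
  | [], _, result, found => (result, found)
  | raw :: rest, seen, result, found =>
    let p := PySem.Str.strip raw
    if p == "" || PySem.Set.contains seen p then tfp_loop candidate rest seen result found
    else if p == candidate then tfp_loop candidate rest seen result true
    else tfp_loop candidate rest (PySem.Set.add seen p) (result ++ [p]) found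

def toggle_favorite_path_alt (paths : Option (List String)) (relative_path : String) : List String :=
  let candidate := PySem.Str.strip relative_path
  let r := tfp_loop candidate (paths.getD []) PySem.Set.empty [] false
  if candidate != "" && !r.2 then r.1 ++ [candidate] else r.1

-- ===== PRECONDITION & SPEC =====
def Spec_toggle_favorite_path (paths : Option (List String)) (relative_path : String) (out : List String) : Prop := out = toggle_favorite_path_alt paths relative_path
instance (paths : Option (List String)) (relative_path : String) (out : List String) : Decidable (Spec_toggle_favorite_path paths relative_path out) := by unfold Spec_toggle_favorite_path; infer_instance

-- ===== CLAIM (what is proved, stated in full; the proofs are below) =====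
def Claim_equal_toggle_favorite_path : Prop := ∀ (paths : Option (List String)) (relative_path : String), Dom_toggle_favorite_path paths relative_path → Spec_toggle_favorite_path paths relative_path (toggle_favorite_path paths relative_path)

-- ===== LEMMAS AND PROOFS =====

-- pure dedup core: what A's loop (limit = none) appends
def pvD : List String → PySem.Set String → List String
  | [], _ => []
  | raw :: rest, seen =>
    let p := PySem.Str.strip raw
    if p == "" || PySem.Set.contains seen p then pvD rest seen
    else p :: pvD rest (PySem.Set.add seen p)

theorem nwp_loop_eq (items : List String) : ∀ (normalized : List String) (seen : PySem.Set String),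
    nwp_loop none items normalized seen = normalized ++ pvD items seen := by
  induction items with
  | nil => intro n s; simp [nwp_loop, pvD]
  | cons raw rest ih =>
    intro n s
    simp only [nwp_loop, pvD]
    split
    · exact ih n s
    · rw [ih]; simp

theorem pvD_cong (c : String) (items : List String) : ∀ (s1 s2 : PySem.Set String),
    (∀ p, p ≠ c → (p ∈ s1 ↔ p ∈ s2)) →
    (pvD items s1).filter (fun x => x != c) = (pvD items s2).filter (fun x => x != c) := by
  induction items with
  | nil => intro _ _ _; rfl
  | cons raw rest ih =>
    intro s1 s2 h
    by_cases he : PySem.Str.strip raw = ""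
    · simp [pvD, he]; exact ih s1 s2 h
    · by_cases hc : PySem.Str.strip raw = c
      · subst hc
        by_cases h1 : PySem.Str.strip raw ∈ s1 <;> by_cases h2 : PySem.Str.strip raw ∈ s2
        · simp [pvD, h1, h2]; exact ih s1 s2 h
        · simp [pvD, he, h1, h2, PySem.Set.add, PySem.Set.contains]
          exact ih s1 (s2 ++ [PySem.Str.strip raw]) (by
            intro p hp; simp [List.mem_append, hp, h p hp])
        · simp [pvD, he, h1, h2, PySem.Set.add, PySem.Set.contains]
          exact ih (s1 ++ [PySem.Str.strip raw]) s2 (by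
            intro p hp; simp [List.mem_append, hp, h p hp])
        · simp [pvD, he, h1, h2, PySem.Set.add, PySem.Set.contains]
          exact ih (s1 ++ [PySem.Str.strip raw]) (s2 ++ [PySem.Str.strip raw]) (by
            intro p hp; simp [List.mem_append, h p hp])
      · have hm := h _ hc
        by_cases h1 : PySem.Str.strip raw ∈ s1
        · have h2 : PySem.Str.strip raw ∈ s2 := hm.mp h1
          simp [pvD, h1, h2]; exact ih s1 s2 h
        · have h2 : PySem.Str.strip raw ∉ s2 := fun k => h1 (hm.mpr k)
          simp [pvD, he, h1, h2, hc, PySem.Set.add, PySem.Set.contains]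
          exact ih (s1 ++ [PySem.Str.strip raw]) (s2 ++ [PySem.Str.strip raw]) (by
            intro p hp; simp [List.mem_append, h p hp])

theorem tfp_loop_eq (c : String) (hc : c ≠ "") (items : List String) :
    ∀ (s : PySem.Set String) (result : List String) (found : Bool),
    c ∉ s →
    tfp_loop c items s result found =
      (result ++ (pvD items s).filter (fun x => x != c), found || decide (c ∈ pvD items s)) := by
  induction items with
  | nil => intro _ _ _ _; simp [tfp_loop, pvD]
  | cons raw rest ih =>
    intro s result found hs
    by_cases he : PySem.Str.strip raw = ""
    · simp [tfp_loop, pvD, he]; exact ih s result found hs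
    · by_cases hpc : PySem.Str.strip raw = c
      · have h1 : PySem.Str.strip raw ∉ s := by rw [hpc]; exact hs
        simp [tfp_loop, pvD, hpc, hc, hs, PySem.Set.add, PySem.Set.contains]
        rw [ih s result true hs]
        simp
        exact pvD_cong c rest s (s ++ [c]) (by
          intro p hp; simp [List.mem_append, hp])
      · by_cases h1 : PySem.Str.strip raw ∈ s
        · simp [tfp_loop, pvD, h1]; exact ih s result found hs
        · have hs' : c ∉ s ++ [PySem.Str.strip raw] := by
            simp [List.mem_append, hs]
            exact fun k => hpc k.symm
          simp [tfp_loop, pvD, he, h1, hpc, PySem.Set.add, PySem.Set.contains]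
          rw [ih _ _ found hs']
          simp [Ne.symm hpc]

theorem tfp_loop_empty (items : List String) :
    ∀ (s : PySem.Set String) (result : List String) (found : Bool),
    tfp_loop "" items s result found = (result ++ pvD items s, found) := by
  induction items with
  | nil => intro _ _ _; simp [tfp_loop, pvD]
  | cons raw rest ih =>
    intro s r f
    by_cases he : PySem.Str.strip raw = ""
    · simp [tfp_loop, pvD, he]; exact ih s r f
    · by_cases hs : PySem.Str.strip raw ∈ s
      · simp [tfp_loop, pvD, hs]; exact ih s r f
      · simp [tfp_loop, pvD, he, hs]; rw [ih]; simp

-- ===== VERDICT (by name: the statement is the Claim_ definition above) =====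
theorem toggle_favorite_path_spec : Claim_equal_toggle_favorite_path := by
  intro paths rp _
  unfold Spec_toggle_favorite_path toggle_favorite_path toggle_favorite_path_alt
    normalize_workspace_paths
  rw [nwp_loop_eq]
  simp only [List.nil_append]
  by_cases hcand : PySem.Str.strip rp = ""
  · rw [hcand]
    rw [tfp_loop_empty]
    simp
  · rw [tfp_loop_eq _ hcand _ PySem.Set.empty [] false (by simp [PySem.Set.empty])]
    by_cases hmem : PySem.Str.strip rp ∈ pvD (paths.getD []) []
    · simp [hcand, hmem, PySem.Set.empty]
    · simp [hcand, hmem, PySem.Set.empty]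
      exact (List.filter_eq_self.mpr (fun a ha => by
        simp
        exact fun k => hmem (k ▸ ha))).symm
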